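-- pv_equiv track=rewrite | github.com/jiyeonkim26/markdown-compiler | markdown_compiler/util/line_functions.py | compile_code_inline
-- ===== SOURCE A (Python) =====
-- def compile_code_inline(line):
--     '''
--     Add <code> tags.
--
--     HINT:
--     This function is like the italics functions because inline code uses only a single character as a delimiter.
--     It is more complex, however, because inline code blocks can contain valid HTML inside of them,
--     but we do not want that HTML to get rendered as HTML.
--     Therefore, we must convert the `<` and `>` signs into `&lt;` and `&gt;` respectively.
--
--     >>> compile_code_inline('You can use backticks like this (`1+2`) to include code in the middle of text.')
--     'You can use backticks like this (<code>1+2</code>) to include code in the middle of text.'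
--     >>> compile_code_inline('This is inline code: `1+2`')
--     'This is inline code: <code>1+2</code>'
--     >>> compile_code_inline('`1+2`')
--     '<code>1+2</code>'
--     >>> compile_code_inline('This example has html within the code: `<b>bold!</b>`')
--     'This example has html within the code: <code>&lt;b&gt;bold!&lt;/b&gt;</code>'
--     >>> compile_code_inline('this example has a math formula in the  code: `1 + 2 < 4`')
--     'this example has a math formula in the  code: <code>1 + 2 &lt; 4</code>'
--     >>> compile_code_inline('this example has a <b>math formula</b> in the  code: `1 + 2 < 4`')
--     'this example has a <b>math formula</b> in the  code: <code>1 + 2 &lt; 4</code>'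
--     >>> compile_code_inline('```')
--     '```'
--     >>> compile_code_inline('```python3')
--     '```python3'
--     '''
--     if line.count('`') < 2 or line.count('`') % 2 != 0:
--         return line
--
--     accumulator = ''
--     has_opened = False
--
--     for char in line:
--         if char == '`':
--             if not has_opened:
--                 accumulator += '<code>'
--                 has_opened = True
--             else:
--                 accumulator += '</code>'
--                 has_opened = False
--         else:
--             if has_opened and char == "<":
--                 accumulator += '&lt;'
--             elif has_opened and char == ">":
--                 accumulator += '&gt;'
--             else:
--                 accumulator += char
--     return accumulator
-- ===== SOURCE B (Python) =====
-- def compile_code_inline(line):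
--     if line.count('`') < 2 or line.count('`') % 2 != 0:
--         return line
--     return _render(line)
--
--
-- def _render(s):
--     if '`' not in s:
--         return s
--     before, _, rest = s.partition('`')
--     code, _, after = rest.partition('`')
--     escaped = ''.join('&lt;' if c == '<' else '&gt;' if c == '>' else c for c in code)
--     return before + '<code>' + escaped + '</code>' + _render(after)
-- ===== Notes on version B (the rewrite author's own statement) =====
-- stated objective: simpler
-- what changed: Replaces the character-by-character state-flag loop with a recursion over backtick-delimited segments: partition off the next `code` pair, escape only that segment, and recurse on the remainder.
import Mathlib
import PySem

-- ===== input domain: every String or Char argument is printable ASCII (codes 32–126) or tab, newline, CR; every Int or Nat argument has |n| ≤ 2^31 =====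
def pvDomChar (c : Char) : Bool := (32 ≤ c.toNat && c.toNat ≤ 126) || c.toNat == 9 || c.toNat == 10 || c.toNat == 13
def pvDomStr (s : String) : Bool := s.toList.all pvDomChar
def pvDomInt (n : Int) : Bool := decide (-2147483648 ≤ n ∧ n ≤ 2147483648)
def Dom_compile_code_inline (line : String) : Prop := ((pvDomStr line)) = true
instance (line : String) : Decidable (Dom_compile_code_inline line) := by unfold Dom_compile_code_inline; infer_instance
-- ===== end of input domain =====

-- B replaces A's character-by-character state-flag loop with a recursion over
-- backtick-delimited segments (simpler decomposition; same cost).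

-- ===== PORT A =====
-- A's accumulator string is carried as a list of characters (String.ofList at the end).
def pvLoopA : List Char → List Char → Bool → List Char
  | [], acc, _ => acc
  | c :: rest, acc, opened =>
    if c = '`' then
      if opened = false then pvLoopA rest (acc ++ "<code>".toList) true
      else pvLoopA rest (acc ++ "</code>".toList) false
    else if opened && (c = '<') then pvLoopA rest (acc ++ "&lt;".toList) opened
    else if opened && (c = '>') then pvLoopA rest (acc ++ "&gt;".toList) opened
    else pvLoopA rest (acc ++ [c]) opened

def compile_code_inline (line : String) : String :=
  if PySem.Str.count line "`" < 2 ∨ PySem.Str.count line "`" % 2 ≠ 0 then line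
  else String.ofList (pvLoopA line.toList [] false)

-- ===== PORT B =====
-- ''.join('&lt;' if c == '<' else '&gt;' if c == '>' else c for c in code)
def pvEsc (c : Char) : List Char :=
  if c = '<' then "&lt;".toList else if c = '>' then "&gt;".toList else [c]

-- s.partition('`') for a 1-char separator is (takeWhile, '`', dropWhile.tail): exact.
def pvRender (s : List Char) : List Char :=
    if h : s.contains '`' = false then s
    else
      let before := s.takeWhile (· ≠ '`')
      let rest := (s.dropWhile (· ≠ '`')).tail
      let code := rest.takeWhile (· ≠ '`')
      let after := (rest.dropWhile (· ≠ '`')).tail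
      before ++ "<code>".toList ++ code.flatMap pvEsc ++ "</code>".toList ++ pvRender after
  termination_by s.length
  decreasing_by
    have h1 : (s.dropWhile (· ≠ '`')) ≠ [] := by
      intro hnil
      have : s.contains '`' = false := by
        simp only [List.contains, Bool.eq_false_iff] at h ⊢
        intro hmem
        have := List.dropWhile_eq_nil_iff (l := s) (p := (· ≠ '`')) |>.mp hnil
        have := this '`' (by simpa using List.elem_iff.mp (by simpa using hmem))
        simp at this
      exact h this
    have h2 : 0 < (s.dropWhile (· ≠ '`')).length := List.length_pos_iff.mpr h1
    have h3 : (s.dropWhile (· ≠ '`')).length ≤ s.length := List.length_dropWhile_le _ _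
    have h4 : ((s.dropWhile (· ≠ '`')).tail.dropWhile (· ≠ '`')).length
        ≤ (s.dropWhile (· ≠ '`')).tail.length := List.length_dropWhile_le _ _
    simp only [List.length_tail] at *
    omega

def compile_code_inline_alt (line : String) : String :=
  if PySem.Str.count line "`" < 2 ∨ PySem.Str.count line "`" % 2 ≠ 0 then line
  else String.ofList (pvRender line.toList)

-- ===== PRECONDITION & SPEC =====
def Spec_compile_code_inline (line : String) (out : String) : Prop := out = compile_code_inline_alt line
instance (line : String) (out : String) : Decidable (Spec_compile_code_inline line out) := by unfold Spec_compile_code_inline; infer_instance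

-- ===== CLAIM (what is proved, stated in full; the proofs are below) =====
def Claim_equal_compile_code_inline : Prop := ∀ (line : String), Dom_compile_code_inline line → Spec_compile_code_inline line (compile_code_inline line)

-- ===== LEMMAS AND PROOFS =====

-- PySem.Chars.count with a one-character needle is List.count.
theorem pvCountGo (fuel : Nat) (l : List Char) (acc : Nat) (h : l.length ≤ fuel) :
    PySem.Chars.count.go ['`'] fuel l acc = acc + l.count '`' := by
  induction fuel generalizing l acc with
  | zero =>
    have : l = [] := List.length_eq_zero_iff.mp (Nat.le_zero.mp h)
    subst this
    simp [PySem.Chars.count.go]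
  | succ n ih =>
    cases l with
    | nil => simp [PySem.Chars.count.go]
    | cons c t =>
      have hlen : t.length ≤ n := by simpa using h
      by_cases hc : c = '`'
      · subst hc
        have hgo : PySem.Chars.count.go ['`'] (n + 1) ('`' :: t) acc
            = PySem.Chars.count.go ['`'] n t (acc + 1) := by
          simp [PySem.Chars.count.go, List.isPrefixOf]
        rw [hgo, ih t (acc + 1) hlen]
        simp
        omega
      · have hbe : ('`' == c) = false := by
          simp only [beq_eq_false_iff_ne, ne_eq]
          exact fun e => hc e.symm
        have hgo : PySem.Chars.count.go ['`'] (n + 1) (c :: t) acc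
            = PySem.Chars.count.go ['`'] n t acc := by
          simp [PySem.Chars.count.go, List.isPrefixOf, hbe]
        rw [hgo, ih t acc hlen]
        simp [hc]

theorem pvCountEq (l : List Char) : PySem.Chars.count l ['`'] = l.count '`' := by
  simpa [PySem.Chars.count] using pvCountGo l.length l 0 le_rfl

-- state CLOSED, segment without backticks: plain copy
theorem pvLoopA_closed (seg : List Char) (hseg : '`' ∉ seg) :
    ∀ (rest acc : List Char), pvLoopA (seg ++ rest) acc false = pvLoopA rest (acc ++ seg) false := by
  induction seg with
  | nil => simp
  | cons c t ih =>
    intro rest acc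
    have hc : c ≠ '`' := fun e => hseg (e ▸ List.mem_cons_self)
    have ht : '`' ∉ t := fun m => hseg (List.mem_cons_of_mem _ m)
    simp only [List.cons_append, pvLoopA, if_neg hc, Bool.false_and, if_neg Bool.false_ne_true]
    rw [ih ht rest (acc ++ [c])]
    simp

-- state OPEN, segment without backticks: escaped copy
theorem pvLoopA_open (seg : List Char) (hseg : '`' ∉ seg) :
    ∀ (rest acc : List Char), pvLoopA (seg ++ rest) acc true = pvLoopA rest (acc ++ seg.flatMap pvEsc) true := by
  induction seg with
  | nil => simp
  | cons c t ih =>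
    intro rest acc
    have hc : c ≠ '`' := fun e => hseg (e ▸ List.mem_cons_self)
    have ht : '`' ∉ t := fun m => hseg (List.mem_cons_of_mem _ m)
    simp only [List.cons_append, pvLoopA, if_neg hc, Bool.true_and]
    by_cases h1 : c = '<'
    · subst h1; rw [if_pos (by decide), ih ht]; simp [pvEsc]
    · by_cases h2 : c = '>'
      · subst h2; rw [if_neg (by decide), if_pos (by decide), ih ht]; simp [pvEsc, List.append_assoc]
      · rw [if_neg (by simp [h1]), if_neg (by simp [h2]), ih ht]
        simp [pvEsc, h1, h2, List.append_assoc]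

-- first-backtick decomposition
theorem pvFirstTick (l : List Char) (h : '`' ∈ l) :
    '`' ∉ l.takeWhile (· ≠ '`') ∧
      l = l.takeWhile (· ≠ '`') ++ '`' :: (l.dropWhile (· ≠ '`')).tail := by
  induction l with
  | nil => cases h
  | cons c t ih =>
    by_cases hc : c = '`'
    · subst hc
      rw [List.takeWhile_cons, List.dropWhile_cons, if_neg (by simp), if_neg (by simp)]
      simp
    · have hm : '`' ∈ t := by
        rcases List.mem_cons.mp h with h' | h'
        · exact absurd h'.symm hc
        · exact h'
      obtain ⟨ih1, ih2⟩ := ih hm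
      have hpc : (decide (c ≠ '`')) = true := by simp [hc]
      refine ⟨?_, ?_⟩
      · rw [List.takeWhile_cons, if_pos hpc]
        intro hmem
        rcases List.mem_cons.mp hmem with h' | h'
        · exact hc h'.symm
        · exact ih1 h'
      · rw [List.takeWhile_cons, List.dropWhile_cons, if_pos hpc, if_pos hpc, List.cons_append]
        exact congrArg (c :: ·) ih2

theorem pvMainLemma (n : Nat) : ∀ (l : List Char), l.length ≤ n → l.count '`' % 2 = 0 →
    ∀ acc, pvLoopA l acc false = acc ++ pvRender l := by
  induction n with
  | zero =>
    intro l hl _ acc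
    have : l = [] := List.length_eq_zero_iff.mp (Nat.le_zero.mp hl)
    subst this
    simp [pvLoopA, pvRender]
  | succ n ih =>
    intro l hl hcnt acc
    by_cases hmem : '`' ∈ l
    · set b := l.takeWhile (· ≠ '`') with hbdef
      set r := (l.dropWhile (· ≠ '`')).tail with hrdef
      obtain ⟨hb, hsplit⟩ := pvFirstTick l hmem
      have hb0 : b.count '`' = 0 := List.count_eq_zero.mpr hb
      have hrodd : r.count '`' % 2 = 1 := by
        have hc : l.count '`' = b.count '`' + (r.count '`' + 1) := by
          conv_lhs => rw [hsplit]
          rw [List.count_append, List.count_cons_self]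
        omega
      have hrmem : '`' ∈ r := by
        by_contra hnot
        have : r.count '`' = 0 := List.count_eq_zero.mpr hnot
        omega
      set code := r.takeWhile (· ≠ '`') with hcodedef
      set after := (r.dropWhile (· ≠ '`')).tail with hafterdef
      obtain ⟨hcode, hrsplit⟩ := pvFirstTick r hrmem
      have hcode0 : code.count '`' = 0 := List.count_eq_zero.mpr hcode
      have haft : after.count '`' % 2 = 0 := by
        have : r.count '`' = code.count '`' + (after.count '`' + 1) := by
          conv_lhs => rw [hrsplit]
          rw [List.count_append, List.count_cons_self]
        omega
      have hlen : after.length ≤ n := by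
        have h1 : l.length = b.length + 1 + r.length := by
          conv_lhs => rw [hsplit]
          rw [List.length_append, List.length_cons, ← hbdef, ← hrdef]
          omega
        have h2 : r.length = code.length + 1 + after.length := by
          conv_lhs => rw [hrsplit]
          rw [List.length_append, List.length_cons, ← hcodedef, ← hafterdef]
          omega
        omega
      have hcontains : l.contains '`' = true := by simpa using hmem
      -- left side
      have L1 : pvLoopA l acc false = pvLoopA ('`' :: r) (acc ++ b) false := by
        conv_lhs => rw [hsplit]
        exact pvLoopA_closed b hb _ acc
      have L2 : pvLoopA ('`' :: r) (acc ++ b) false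
          = pvLoopA r (acc ++ b ++ "<code>".toList) true := by
        simp [pvLoopA]
      have L3 : pvLoopA r (acc ++ b ++ "<code>".toList) true
          = pvLoopA ('`' :: after)
              (acc ++ b ++ "<code>".toList ++ code.flatMap pvEsc) true := by
        conv_lhs => rw [hrsplit]
        exact pvLoopA_open code hcode _ _
      have L4 : pvLoopA ('`' :: after)
            (acc ++ b ++ "<code>".toList ++ code.flatMap pvEsc) true
          = pvLoopA after
              (acc ++ b ++ "<code>".toList ++ code.flatMap pvEsc ++ "</code>".toList) false := by
        simp [pvLoopA]
      have L5 := ih after hlen haft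
          (acc ++ b ++ "<code>".toList ++ code.flatMap pvEsc ++ "</code>".toList)
      -- right side
      have R : pvRender l
          = b ++ "<code>".toList ++ code.flatMap pvEsc ++ "</code>".toList ++ pvRender after := by
        conv_lhs => rw [pvRender]
        rw [dif_neg (by rw [hcontains]; simp)]
      rw [L1, L2, L3, L4, L5, R]
      simp [List.append_assoc]
    · have hcontains : l.contains '`' = false := by
        simpa using hmem
      have h1 : pvLoopA l acc false = acc ++ l := by
        have := pvLoopA_closed l hmem [] acc
        simpa [pvLoopA] using this
      rw [h1]
      conv_rhs => rw [pvRender]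
      rw [dif_pos hcontains]

-- ===== VERDICT (by name: the statement is the Claim_ definition above) =====
theorem compile_code_inline_spec : Claim_equal_compile_code_inline := by
  intro line _
  unfold Spec_compile_code_inline compile_code_inline compile_code_inline_alt
  split_ifs with h
  · rfl
  · rw [not_or] at h
    have hcnt : (line.toList.count '`') % 2 = 0 := by
      have h2 := h.2
      simpa [PySem.Str.count_eq, pvCountEq] using h2
    have hmain := pvMainLemma line.toList.length line.toList le_rfl hcnt []
    simp only [List.nil_append] at hmain
    rw [hmain]
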